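-- pv_equiv track=rewrite | github.com/sinhaapurva25/interview-experiences | hrt/3.py | solution
-- ===== SOURCE A (Python) =====
-- def solution(firstArray, secondArray):
--     firstArray = list(map(str, firstArray))
--     secondArray = list(map(str, secondArray))
--
--     firstArray.sort(key=lambda x: len(x), reverse=True)
--     secondArray.sort(key=lambda x: len(x), reverse=True)
--
--     mx = 0
--     for i in range(len(firstArray)):
--         for j in range(len(secondArray)):
--             c = 0
--             for x in range(min(len(firstArray[i]), len(secondArray[j]))):
--                 if firstArray[i][x] == secondArray[j][x]:
--                     c += 1
--                 else:
--                     break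
--             if c > mx:
--                 mx = c
--             if j != len(secondArray)-1:
--                 if mx >= len(secondArray[j+1]):
--                     break
--         if i != len(firstArray)-1:
--             if mx >= len(firstArray[i+1]):
--                 break
--     return mx
-- ===== SOURCE B (Python) =====
-- def solution(firstArray, secondArray):
--     # Hash-set of every nonempty prefix of str(v) for v in firstArray,
--     # then greedily extend each str(w), w in secondArray, through the set.
--     prefixes = set()
--     for v in firstArray:
--         s = str(v)
--         for k in range(len(s)):
--             prefixes.add(s[:k + 1])
--     best = 0
--     for w in secondArray:
--         s = str(w)
--         k = 0
--         while k < len(s) and s[:k + 1] in prefixes: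
--             k += 1
--         if k > best:
--             best = k
--     return best
-- ===== Notes on version B (the rewrite author's own statement) =====
-- stated objective: alternative
-- what changed: Replaces A's sort plus pruned pairwise comparison of all string pairs by a hash-set of every prefix of the firstArray strings, through which each secondArray string is walked greedily, so no pair of strings is ever compared directly.
import Mathlib
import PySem

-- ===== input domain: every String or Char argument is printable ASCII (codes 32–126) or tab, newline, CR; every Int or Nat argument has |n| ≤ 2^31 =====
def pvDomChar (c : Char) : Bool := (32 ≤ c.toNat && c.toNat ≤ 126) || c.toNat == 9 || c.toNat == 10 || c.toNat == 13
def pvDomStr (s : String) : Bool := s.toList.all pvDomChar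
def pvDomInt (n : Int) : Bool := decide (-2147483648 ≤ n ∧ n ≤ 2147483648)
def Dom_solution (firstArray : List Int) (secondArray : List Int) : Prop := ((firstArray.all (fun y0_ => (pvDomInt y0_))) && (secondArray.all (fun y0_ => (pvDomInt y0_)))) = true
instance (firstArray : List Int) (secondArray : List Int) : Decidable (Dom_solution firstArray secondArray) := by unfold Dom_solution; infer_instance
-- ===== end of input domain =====

-- B replaces A's sorted, pruned pairwise scan by a prefix hash-set built from
-- firstArray, walked greedily by each secondArray string (objective: alternative).


-- ===== PORT A =====
-- inner x-loop of A: count matching leading characters, stop at first mismatch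
def pvLcp : List Char → List Char → Nat
  | x :: xs, y :: ys => if x = y then pvLcp xs ys + 1 else 0
  | _, _ => 0

-- j-loop of A over (sorted) secondArray, with A's early break 'mx >= len(secondArray[j+1])'
def pvInnerA (a : List Char) : List (List Char) → Nat → Nat
  | [], mx => mx
  | [b], mx => let c := pvLcp a b; if c > mx then c else mx
  | b :: b2 :: rest, mx =>
      let c := pvLcp a b
      let mx' := if c > mx then c else mx
      if mx' ≥ b2.length then mx' else pvInnerA a (b2 :: rest) mx'

-- i-loop of A over (sorted) firstArray, with A's early break 'mx >= len(firstArray[i+1])'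
def pvOuterA (sb : List (List Char)) : List (List Char) → Nat → Nat
  | [], mx => mx
  | [a], mx => pvInnerA a sb mx
  | a :: a2 :: rest, mx =>
      let mx' := pvInnerA a sb mx
      if mx' ≥ a2.length then mx' else pvOuterA sb (a2 :: rest) mx'

def solution (firstArray : List Int) (secondArray : List Int) : Int :=
  let fa := PySem.List.sorted (firstArray.map PySem.Int.toChars) (fun s => s.length) true
  let sb := PySem.List.sorted (secondArray.map PySem.Int.toChars) (fun s => s.length) true
  ((pvOuterA sb fa 0 : Nat) : Int)

-- ===== PORT B =====
-- the prefix set: every nonempty prefix s[:k+1] of each str(v), v in firstArray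
def pvPrefixes (firstArray : List Int) : PySem.Set (List Char) :=
  firstArray.foldl (fun P v =>
    let s := PySem.Int.toChars v
    (List.range s.length).foldl (fun P k => PySem.Set.add P (s.take (k + 1))) P)
    PySem.Set.empty

-- B's while loop: extend k while s[:k+1] is in the prefix set
def pvWalk (P : PySem.Set (List Char)) (s : List Char) (k : Nat) : Nat :=
  if k < s.length ∧ PySem.Set.contains P (s.take (k + 1)) then pvWalk P s (k + 1) else k
termination_by s.length - k
decreasing_by omega

def solution_alt (firstArray : List Int) (secondArray : List Int) : Int :=
  let P := pvPrefixes firstArray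
  ((secondArray.foldl (fun best w =>
      let k := pvWalk P (PySem.Int.toChars w) 0
      if k > best then k else best) 0 : Nat) : Int)

-- ===== PRECONDITION & SPEC =====
def Spec_solution (firstArray : List Int) (secondArray : List Int) (out : Int) : Prop := out = solution_alt firstArray secondArray
instance (firstArray : List Int) (secondArray : List Int) (out : Int) : Decidable (Spec_solution firstArray secondArray out) := by unfold Spec_solution; infer_instance

-- ===== CLAIM (what is proved, stated in full; the proofs are below) =====
def Claim_equal_solution : Prop := ∀ (firstArray : List Int) (secondArray : List Int), Dom_solution firstArray secondArray → Spec_solution firstArray secondArray (solution firstArray secondArray)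

-- ===== LEMMAS AND PROOFS =====

-- the common value both programs compute: max over all pairs of the common-prefix length
def pvMaxInner (a : List Char) (sb : List (List Char)) : Nat :=
  sb.foldr (fun b m => max (pvLcp a b) m) 0
def pvMaxPairs (fa sb : List (List Char)) : Nat :=
  fa.foldr (fun a m => max (pvMaxInner a sb) m) 0

theorem pvLcp_le_left : ∀ a b : List Char, pvLcp a b ≤ a.length := by
  intro a; induction a with
  | nil => intro b; cases b <;> simp [pvLcp]
  | cons x xs ih => intro b; cases b with
    | nil => simp [pvLcp]
    | cons y ys =>
        simp only [pvLcp, List.length_cons]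
        split
        · have := ih ys; omega
        · omega

theorem pvLcp_le_right : ∀ a b : List Char, pvLcp a b ≤ b.length := by
  intro a; induction a with
  | nil => intro b; cases b <;> simp [pvLcp]
  | cons x xs ih => intro b; cases b with
    | nil => simp [pvLcp]
    | cons y ys =>
        simp only [pvLcp, List.length_cons]
        split
        · have := ih ys; omega
        · omega

theorem pvLcp_comm : ∀ a b : List Char, pvLcp a b = pvLcp b a := by
  intro a; induction a with
  | nil => intro b; cases b <;> simp [pvLcp]
  | cons x xs ih => intro b; cases b with
    | nil => simp [pvLcp]
    | cons y ys =>
        simp only [pvLcp]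
        by_cases h : x = y
        · subst h; simp [ih ys]
        · rw [if_neg h, if_neg (fun hh => h hh.symm)]

theorem le_pvLcp_iff : ∀ (k : Nat) (a b : List Char),
    k ≤ pvLcp a b ↔ k ≤ a.length ∧ k ≤ b.length ∧ a.take k = b.take k := by
  intro k; induction k with
  | zero => intro a b; simp
  | succ k ih =>
      intro a b
      cases a with
      | nil => simp [pvLcp]
      | cons x xs => cases b with
        | nil => simp [pvLcp]
        | cons y ys =>
            simp only [pvLcp, List.take_succ_cons, List.length_cons]
            by_cases h : x = y
            · subst h; simp only [if_true]
              constructor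
              · intro hk; have := (ih xs ys).1 (by omega)
                exact ⟨by omega, by omega, by simp [this.2.2]⟩
              · intro ⟨h1, h2, h3⟩
                have := (ih xs ys).2 ⟨by omega, by omega, by simpa using h3⟩
                omega
            · simp only [if_neg h]
              constructor
              · omega
              · intro ⟨_, _, h3⟩
                exact absurd (by simpa using congrArg (fun l => l.head?) h3) h

theorem pvMaxInner_le (a : List Char) (sb : List (List Char)) (c : Nat)
    (h : ∀ b ∈ sb, pvLcp a b ≤ c) : pvMaxInner a sb ≤ c := by
  induction sb with
  | nil => simp [pvMaxInner]
  | cons b t ih =>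
      simp only [pvMaxInner, List.foldr_cons] at *
      have h1 := h b (by simp)
      have h2 := ih (fun x hx => h x (by simp [hx]))
      omega

theorem pvInnerA_eq (a : List Char) : ∀ (sb : List (List Char)) (mx : Nat),
    sb.Pairwise (fun x y => y.length ≤ x.length) →
    pvInnerA a sb mx = max mx (pvMaxInner a sb) := by
  intro sb; induction sb with
  | nil => intro mx _; simp [pvInnerA, pvMaxInner]
  | cons b t ih =>
      intro mx hp
      cases t with
      | nil =>
          simp only [pvInnerA, pvMaxInner, List.foldr_cons, List.foldr_nil]
          split <;> omega
      | cons b2 r =>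
          simp only [pvInnerA]
          have hp' := (List.pairwise_cons.mp hp).2
          have hmi : pvMaxInner a (b2 :: r) ≤ b2.length := by
            apply pvMaxInner_le
            intro x hx
            rcases List.mem_cons.mp hx with h | hx
            · subst h; exact pvLcp_le_right a x
            · exact le_trans (pvLcp_le_right a x) ((List.pairwise_cons.mp hp').1 x hx)
          have hcons : pvMaxInner a (b :: b2 :: r) = max (pvLcp a b) (pvMaxInner a (b2 :: r)) := rfl
          have hmx' : (if pvLcp a b > mx then pvLcp a b else mx) = max mx (pvLcp a b) := by
            split <;> omega
          rw [hmx']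
          by_cases hc : max mx (pvLcp a b) ≥ b2.length
          · rw [if_pos hc, hcons]; omega
          · rw [if_neg hc, ih _ hp', hcons]; omega

theorem pvMaxPairs_le (fa sb : List (List Char)) (c : Nat)
    (h : ∀ a ∈ fa, pvMaxInner a sb ≤ c) : pvMaxPairs fa sb ≤ c := by
  induction fa with
  | nil => simp [pvMaxPairs]
  | cons a t ih =>
      simp only [pvMaxPairs, List.foldr_cons] at *
      have h1 := h a (by simp)
      have h2 := ih (fun x hx => h x (by simp [hx]))
      omega

theorem pvOuterA_eq (sb : List (List Char))
    (hsb : sb.Pairwise (fun x y => y.length ≤ x.length)) :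
    ∀ (fa : List (List Char)) (mx : Nat),
    fa.Pairwise (fun x y => y.length ≤ x.length) →
    pvOuterA sb fa mx = max mx (pvMaxPairs fa sb) := by
  intro fa; induction fa with
  | nil => intro mx _; simp [pvOuterA, pvMaxPairs]
  | cons a t ih =>
      intro mx hp
      cases t with
      | nil =>
          simp only [pvOuterA, pvMaxPairs, List.foldr_cons, List.foldr_nil]
          rw [pvInnerA_eq a sb mx hsb]; omega
      | cons a2 r =>
          simp only [pvOuterA]
          rw [pvInnerA_eq a sb mx hsb]
          have hp' := (List.pairwise_cons.mp hp).2
          have hmp : pvMaxPairs (a2 :: r) sb ≤ a2.length := by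
            apply pvMaxPairs_le
            intro x hx
            have hx' : x.length ≤ a2.length := by
              rcases List.mem_cons.mp hx with h | hx
              · subst h; exact le_refl _
              · exact (List.pairwise_cons.mp hp').1 x hx
            exact le_trans (pvMaxInner_le x sb x.length (fun b _ => pvLcp_le_left x b)) hx'
          have hcons : pvMaxPairs (a :: a2 :: r) sb = max (pvMaxInner a sb) (pvMaxPairs (a2 :: r) sb) := rfl
          by_cases hc : max mx (pvMaxInner a sb) ≥ a2.length
          · rw [if_pos hc, hcons]; omega
          · rw [if_neg hc, ih _ hp', hcons]; omega

-- pvMaxInner / pvMaxPairs only depend on the lists up to permutation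
theorem pvMaxInner_perm (a : List Char) {sb sb' : List (List Char)} (h : sb.Perm sb') :
    pvMaxInner a sb = pvMaxInner a sb' := by
  induction h with
  | nil => rfl
  | cons x _ ih => simp only [pvMaxInner, List.foldr_cons] at *; omega
  | swap x y l => simp only [pvMaxInner, List.foldr_cons]; omega
  | trans _ _ ih1 ih2 => exact ih1.trans ih2

theorem pvMaxPairs_perm_left {fa fa' : List (List Char)} (sb : List (List Char))
    (h : fa.Perm fa') : pvMaxPairs fa sb = pvMaxPairs fa' sb := by
  induction h with
  | nil => rfl
  | cons x _ ih => simp only [pvMaxPairs, List.foldr_cons] at *; omega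
  | swap x y l => simp only [pvMaxPairs, List.foldr_cons]; omega
  | trans _ _ ih1 ih2 => exact ih1.trans ih2

theorem pvMaxPairs_perm_right (fa : List (List Char)) {sb sb' : List (List Char)}
    (h : sb.Perm sb') : pvMaxPairs fa sb = pvMaxPairs fa sb' := by
  induction fa with
  | nil => rfl
  | cons a t ih =>
      simp only [pvMaxPairs, List.foldr_cons] at *
      rw [pvMaxInner_perm a h, ih]

theorem foldr_max_split (u v : List Char → Nat) (l : List (List Char)) :
    l.foldr (fun b m => max (max (u b) (v b)) m) 0
      = max (l.foldr (fun b m => max (u b) m) 0) (l.foldr (fun b m => max (v b) m) 0) := by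
  induction l with
  | nil => rfl
  | cons b t ih => simp only [List.foldr_cons, ih]; omega

theorem pvMaxInner_comm (a : List Char) (sb : List (List Char)) :
    pvMaxInner a sb = sb.foldr (fun b m => max (pvLcp b a) m) 0 := by
  induction sb with
  | nil => rfl
  | cons b t ih => simp only [pvMaxInner, List.foldr_cons] at *; rw [pvLcp_comm, ih]

theorem pvMaxPairs_nil_right (fa : List (List Char)) : pvMaxPairs fa [] = 0 := by
  induction fa with
  | nil => rfl
  | cons a t ih => simp only [pvMaxPairs, List.foldr_cons] at *; simp [pvMaxInner]

-- swap the two folds: the max over pairs can be taken from either side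
theorem pvMaxPairs_swap : ∀ (fa sb : List (List Char)),
    pvMaxPairs fa sb = pvMaxPairs sb fa := by
  intro fa; induction fa with
  | nil => intro sb; rw [pvMaxPairs_nil_right]; rfl
  | cons a t ih =>
      intro sb
      have h1 : pvMaxPairs (a :: t) sb = max (pvMaxInner a sb) (pvMaxPairs t sb) := rfl
      have h2 : pvMaxPairs sb (a :: t)
          = sb.foldr (fun b m => max (max (pvLcp b a) (pvMaxInner b t)) m) 0 := rfl
      rw [h1, h2, foldr_max_split, ← pvMaxInner_comm, ih]
      rfl

-- membership in the prefix set
theorem mem_pvPrefixes_aux (l : List Int) : ∀ (P0 : PySem.Set (List Char)) (x : List Char),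
    x ∈ l.foldl (fun P v =>
        let s := PySem.Int.toChars v
        (List.range s.length).foldl (fun P k => PySem.Set.add P (s.take (k + 1))) P) P0
    ↔ x ∈ P0 ∨ ∃ v ∈ l, ∃ k < (PySem.Int.toChars v).length, x = (PySem.Int.toChars v).take (k + 1) := by
  induction l with
  | nil => simp
  | cons v t ih =>
      intro P0 x
      simp only [List.foldl_cons]
      rw [ih]
      rw [PySem.Set.mem_foldl_add]
      simp only [List.mem_range, List.mem_cons]
      constructor
      · rintro (⟨h | ⟨k, hk, he⟩⟩ | ⟨w, hw, k, hk, he⟩)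
        · exact Or.inl h
        · exact Or.inr ⟨v, Or.inl rfl, k, hk, he⟩
        · exact Or.inr ⟨w, Or.inr hw, k, hk, he⟩
      · rintro (h | ⟨w, (rfl | hw), k, hk, he⟩)
        · exact Or.inl (Or.inl h)
        · exact Or.inl (Or.inr ⟨k, hk, he⟩)
        · exact Or.inr ⟨w, hw, k, hk, he⟩

theorem mem_pvPrefixes (firstArray : List Int) (x : List Char) :
    x ∈ pvPrefixes firstArray ↔
      ∃ v ∈ firstArray, ∃ k < (PySem.Int.toChars v).length,
        x = (PySem.Int.toChars v).take (k + 1) := by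
  rw [pvPrefixes, mem_pvPrefixes_aux]
  simp [PySem.Set.empty]

theorem succ_le_foldr_max_iff (f : Int → Nat) (l : List Int) (k : Nat) :
    k + 1 ≤ l.foldr (fun v m => max (f v) m) 0 ↔ ∃ v ∈ l, k + 1 ≤ f v := by
  induction l with
  | nil => simp
  | cons v t ih =>
      simp only [List.foldr_cons, List.mem_cons]
      constructor
      · intro h
        by_cases hv : k + 1 ≤ f v
        · exact ⟨v, Or.inl rfl, hv⟩
        · have : k + 1 ≤ t.foldr (fun v m => max (f v) m) 0 := by omega
          obtain ⟨w, hw, hle⟩ := ih.mp this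
          exact ⟨w, Or.inr hw, hle⟩
      · rintro ⟨w, (rfl | hw), hle⟩
        · omega
        · have := ih.mpr ⟨w, hw, hle⟩; omega

-- the best lcp of s against firstArray's strings
def pvBest (firstArray : List Int) (s : List Char) : Nat :=
  firstArray.foldr (fun v m => max (pvLcp s (PySem.Int.toChars v)) m) 0

theorem pvWalk_cond_iff (firstArray : List Int) (s : List Char) (k : Nat) :
    (k < s.length ∧ PySem.Set.contains (pvPrefixes firstArray) (s.take (k + 1)) = true)
    ↔ k + 1 ≤ pvBest firstArray s := by
  constructor
  · rintro ⟨hk, hc⟩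
    rw [PySem.Set.contains_iff, mem_pvPrefixes] at hc
    obtain ⟨v, hv, j, hj, he⟩ := hc
    have hlen : (s.take (k + 1)).length = k + 1 := by simp; omega
    have hlen2 : ((PySem.Int.toChars v).take (j + 1)).length = j + 1 := by simp; omega
    have hjk : j = k := by rw [he] at hlen; omega
    rw [hjk] at hj he
    have hlcp : k + 1 ≤ pvLcp s (PySem.Int.toChars v) :=
      (le_pvLcp_iff (k + 1) s (PySem.Int.toChars v)).2 ⟨by omega, by omega, he⟩
    exact (succ_le_foldr_max_iff _ _ _).mpr ⟨v, hv, hlcp⟩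
  · intro h
    obtain ⟨v, hv, hlcp⟩ := (succ_le_foldr_max_iff _ _ _).mp h
    obtain ⟨h1, h2, h3⟩ := (le_pvLcp_iff (k + 1) s (PySem.Int.toChars v)).1 hlcp
    refine ⟨by omega, ?_⟩
    rw [PySem.Set.contains_iff, mem_pvPrefixes]
    exact ⟨v, hv, k, by omega, h3⟩

theorem pvWalk_eq (firstArray : List Int) (s : List Char) :
    ∀ (d k : Nat), k + d = pvBest firstArray s →
    pvWalk (pvPrefixes firstArray) s k = pvBest firstArray s := by
  intro d; induction d with
  | zero =>
      intro k hk
      rw [pvWalk]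
      rw [if_neg]
      · omega
      · intro hc
        have := (pvWalk_cond_iff firstArray s k).1 hc
        omega
  | succ d ih =>
      intro k hk
      rw [pvWalk, if_pos]
      · exact ih (k + 1) (by omega)
      · exact (pvWalk_cond_iff firstArray s k).2 (by omega)

theorem foldl_if_max (f : Int → Nat) (l : List Int) :
    ∀ acc : Nat, l.foldl (fun best w => if f w > best then f w else best) acc
      = max acc (l.foldr (fun w m => max (f w) m) 0) := by
  induction l with
  | nil => intro acc; simp
  | cons w t ih =>
      intro acc
      simp only [List.foldl_cons, List.foldr_cons]
      rw [ih]
      split <;> omega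

theorem solution_alt_eq (firstArray secondArray : List Int) :
    solution_alt firstArray secondArray
      = ((pvMaxPairs (secondArray.map PySem.Int.toChars) (firstArray.map PySem.Int.toChars) : Nat) : Int) := by
  rw [solution_alt]
  have hstep : ∀ w : Int, pvWalk (pvPrefixes firstArray) (PySem.Int.toChars w) 0
      = pvBest firstArray (PySem.Int.toChars w) := fun w =>
    pvWalk_eq firstArray (PySem.Int.toChars w) (pvBest firstArray (PySem.Int.toChars w)) 0 (by omega)
  have hfold : secondArray.foldl (fun best w =>
      let k := pvWalk (pvPrefixes firstArray) (PySem.Int.toChars w) 0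
      if k > best then k else best) 0
      = secondArray.foldl (fun best w =>
        if pvBest firstArray (PySem.Int.toChars w) > best
        then pvBest firstArray (PySem.Int.toChars w) else best) 0 := by
    congr 1; funext best w; simp only [hstep]
  simp only [hfold, foldl_if_max]
  congr 1
  have h1 : ∀ w : Int, pvBest firstArray (PySem.Int.toChars w)
      = pvMaxInner (PySem.Int.toChars w) (firstArray.map PySem.Int.toChars) := by
    intro w
    rw [pvBest, pvMaxInner, List.foldr_map]
  simp only [h1]
  rw [pvMaxPairs, List.foldr_map]
  omega

-- ===== VERDICT (by name: the statement is the Claim_ definition above) =====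
theorem solution_spec : Claim_equal_solution := by
  intro firstArray secondArray _
  unfold Spec_solution
  rw [solution_alt_eq, solution]
  have hfa := PySem.List.sorted_pairwise_rev (firstArray.map PySem.Int.toChars) (fun s => s.length)
  have hsb := PySem.List.sorted_pairwise_rev (secondArray.map PySem.Int.toChars) (fun s => s.length)
  rw [pvOuterA_eq _ hsb _ 0 hfa]
  have hpfa := PySem.List.sorted_perm (firstArray.map PySem.Int.toChars) (fun s => s.length) true
  have hpsb := PySem.List.sorted_perm (secondArray.map PySem.Int.toChars) (fun s => s.length) true
  rw [pvMaxPairs_perm_left _ hpfa, pvMaxPairs_perm_right _ hpsb, pvMaxPairs_swap]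
  omega
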